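-- pv_equiv track=rewrite | github.com/mel-hsw/agent-failure-attribution | scripts/reparse_batch.py | _predict_cluster_phase_b
-- ===== SOURCE A (Python) =====
-- CLUSTER_PRIORITY = ["N5", "N4", "N3", "N2", "N1", "P4", "P3", "P2", "P1"]
--
-- def _predict_cluster_phase_b(verdicts: dict[str, str]) -> tuple[str | None, bool]:
--     no_ids = [rid for rid, v in verdicts.items() if v == "no"]
--     if not no_ids:
--         return None, True
--     for cid in CLUSTER_PRIORITY:
--         if cid in no_ids:
--             return cid, False
--     return no_ids[0], False
-- ===== SOURCE B (Python) =====
-- CLUSTER_PRIORITY = ["N5", "N4", "N3", "N2", "N1", "P4", "P3", "P2", "P1"]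
-- _PRIORITY_RANK = {cid: i for i, cid in enumerate(CLUSTER_PRIORITY)}
--
-- def _predict_cluster_phase_b(verdicts):
--     first_no = None
--     best = None
--     best_rank = len(CLUSTER_PRIORITY)
--     for rid, v in verdicts.items():
--         if v != "no":
--             continue
--         if first_no is None:
--             first_no = rid
--         r = _PRIORITY_RANK.get(rid, len(CLUSTER_PRIORITY))
--         if r < best_rank:
--             best_rank = r
--             best = rid
--     if first_no is None:
--         return None, True
--     if best is not None:
--         return best, False
--     return first_no, False
-- ===== Notes on version B (the rewrite author's own statement) =====
-- stated objective: alternative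
-- what changed: Replaces A's build-a-no-list-then-scan-the-priority-list-with-repeated-membership-tests by a single pass over the verdicts maintaining the first 'no' id and the running minimum-rank 'no' id via a precomputed rank dict.
import Mathlib
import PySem

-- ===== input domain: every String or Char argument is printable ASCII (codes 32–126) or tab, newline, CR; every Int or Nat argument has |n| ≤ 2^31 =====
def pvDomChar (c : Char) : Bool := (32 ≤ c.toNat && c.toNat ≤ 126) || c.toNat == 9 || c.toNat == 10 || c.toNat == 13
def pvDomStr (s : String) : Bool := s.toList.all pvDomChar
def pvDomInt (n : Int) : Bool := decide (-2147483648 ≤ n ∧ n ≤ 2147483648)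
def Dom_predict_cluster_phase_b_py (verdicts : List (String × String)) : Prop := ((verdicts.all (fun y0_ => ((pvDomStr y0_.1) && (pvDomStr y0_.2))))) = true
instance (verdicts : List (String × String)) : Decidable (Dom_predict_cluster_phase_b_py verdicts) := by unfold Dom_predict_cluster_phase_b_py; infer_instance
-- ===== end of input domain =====

set_option maxHeartbeats 800000


-- B makes a single pass over the verdicts with a precomputed rank dict, instead of A's
-- build-the-no-list-then-scan-the-priority-list-with-membership-tests (return value only).

-- ===== PORT A =====
def clusterPriority : List String := ["N5", "N4", "N3", "N2", "N1", "P4", "P3", "P2", "P1"]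

-- the 'for cid in CLUSTER_PRIORITY: if cid in no_ids: return cid, False' loop
def pvScanPrio : List String → List String → Option String
  | [], _ => none
  | c :: rest, noIds => if noIds.contains c then some c else pvScanPrio rest noIds

def predict_cluster_phase_b_py (verdicts : List (String × String)) : Option String × Bool :=
  let noIds := (verdicts.filter (fun p => p.2 == "no")).map Prod.fst
  if noIds.isEmpty then (none, true)
  else
    match pvScanPrio clusterPriority noIds with
    | some cid => (some cid, false)
    | none => (noIds.head?, false)

-- ===== PORT B =====
-- _PRIORITY_RANK = {cid: i for i, cid in enumerate(CLUSTER_PRIORITY)}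
def pvPriorityRank : PySem.Dict String Nat :=
  (clusterPriority.zipIdx).foldl (fun d p => d.insert p.1 p.2) PySem.Dict.empty

-- the single for-loop of B: state (first_no, best, best_rank)
def pvLoopB : List (String × String) → Option String → Option String → Nat →
    Option String × Option String × Nat
  | [], firstNo, best, bestRank => (firstNo, best, bestRank)
  | (rid, v) :: rest, firstNo, best, bestRank =>
    if v ≠ "no" then pvLoopB rest firstNo best bestRank
    else
      let firstNo' := if firstNo.isNone then some rid else firstNo
      let r := pvPriorityRank.getD rid 9
      if r < bestRank then pvLoopB rest firstNo' (some rid) r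
      else pvLoopB rest firstNo' best bestRank

def predict_cluster_phase_b_py_alt (verdicts : List (String × String)) : Option String × Bool :=
  match pvLoopB verdicts none none 9 with
  | (none, _, _) => (none, true)
  | (some firstNo, best, _) =>
    match best with
    | some bid => (some bid, false)
    | none => (some firstNo, false)

-- ===== PRECONDITION & SPEC =====
def Spec_predict_cluster_phase_b_py (verdicts : List (String × String)) (out : Option String × Bool) : Prop := out = predict_cluster_phase_b_py_alt verdicts
instance (verdicts : List (String × String)) (out : Option String × Bool) : Decidable (Spec_predict_cluster_phase_b_py verdicts out) := by unfold Spec_predict_cluster_phase_b_py; infer_instance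

-- ===== CLAIM (what is proved, stated in full; the proofs are below) =====
def Claim_equal_predict_cluster_phase_b_py : Prop := ∀ (verdicts : List (String × String)), Dom_predict_cluster_phase_b_py verdicts → Spec_predict_cluster_phase_b_py verdicts (predict_cluster_phase_b_py verdicts)

-- ===== LEMMAS AND PROOFS =====

-- the rank B's dict assigns to a string, as nested ifs
def pvRankOf (s : String) : Nat := pvPriorityRank.getD s 9

lemma rankOf_eq (s : String) : pvRankOf s =
    if "N5" == s then 0 else if "N4" == s then 1 else if "N3" == s then 2 else
    if "N2" == s then 3 else if "N1" == s then 4 else if "P4" == s then 5 else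
    if "P3" == s then 6 else if "P2" == s then 7 else if "P1" == s then 8 else 9 := by
  have h : pvPriorityRank = PySem.Dict.mk [("N5",0),("N4",1),("N3",2),("N2",3),("N1",4),("P4",5),("P3",6),("P2",7),("P1",8)] := by decide
  rw [pvRankOf, h]
  simp only [PySem.Dict.getD, PySem.Dict.get?_mk_cons]
  repeat' split
  all_goals simp_all [PySem.Dict.get?]

lemma rank_le_nine (s : String) : pvRankOf s ≤ 9 := by
  rw [rankOf_eq]; repeat' split
  all_goals omega

lemma rank_inv (s : String) (h : pvRankOf s < 9) :
    clusterPriority.getD (pvRankOf s) "" = s := by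
  rw [rankOf_eq] at h ⊢
  repeat' split at h
  all_goals simp_all [clusterPriority]

-- B's best-tracking, restricted to the list of "no" ids
def pvSel : List String → Nat → Option String
  | [], _ => none
  | x :: t, br =>
    if pvRankOf x < br then some ((pvSel t (pvRankOf x)).getD x) else pvSel t br

-- the running minimum rank
def pvMinR (l : List String) (br : Nat) : Nat :=
  l.foldl (fun a x => if pvRankOf x < a then pvRankOf x else a) br

lemma minR_nil (br : Nat) : pvMinR [] br = br := rfl

lemma minR_cons (x : String) (t : List String) (br : Nat) :
    pvMinR (x :: t) br = pvMinR t (if pvRankOf x < br then pvRankOf x else br) := rfl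

lemma minR_le (l : List String) : ∀ br, pvMinR l br ≤ br := by
  induction l with
  | nil => intro br; simp [pvMinR]
  | cons x t ih =>
    intro br
    rw [minR_cons]
    split
    · have := ih (pvRankOf x); omega
    · exact ih br

lemma minR_le_mem (l : List String) : ∀ br, ∀ x ∈ l, pvMinR l br ≤ pvRankOf x := by
  induction l with
  | nil => intro br x hx; simp at hx
  | cons y t ih =>
    intro br x hx
    rw [minR_cons]
    rcases List.mem_cons.mp hx with h | h
    · subst h
      split
      · exact minR_le t _
      · have := minR_le t br; omega
    · exact ih _ x h

lemma minR_attained (l : List String) : ∀ br, pvMinR l br < br →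
    ∃ x ∈ l, pvRankOf x = pvMinR l br := by
  induction l with
  | nil => intro br h; rw [minR_nil] at h; omega
  | cons y t ih =>
    intro br h
    rw [minR_cons] at h ⊢
    by_cases hy : pvRankOf y < br
    · rw [if_pos hy] at h ⊢
      by_cases h2 : pvMinR t (pvRankOf y) < pvRankOf y
      · obtain ⟨x, hx, hr⟩ := ih _ h2
        exact ⟨x, List.mem_cons_of_mem _ hx, hr⟩
      · have h3 := minR_le t (pvRankOf y)
        have heq : pvMinR t (pvRankOf y) = pvRankOf y := by omega
        exact ⟨y, List.mem_cons_self, heq.symm⟩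
    · rw [if_neg hy] at h ⊢
      by_cases h2 : pvMinR t br < br
      · obtain ⟨x, hx, hr⟩ := ih _ h2
        exact ⟨x, List.mem_cons_of_mem _ hx, hr⟩
      · omega

-- pvSel returns the (unique-as-a-string) minimum-rank element, if any rank beats the cap
lemma sel_eq (l : List String) : ∀ br, br ≤ 9 → pvSel l br =
    if pvMinR l br < br then some (clusterPriority.getD (pvMinR l br) "") else none := by
  induction l with
  | nil => intro br _; simp [pvSel, minR_nil]
  | cons x t ih =>
    intro br hbr
    rw [minR_cons]
    by_cases hx : pvRankOf x < br
    · rw [pvSel, if_pos hx, if_pos hx]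
      have hx9 : pvRankOf x ≤ 9 := rank_le_nine x
      rw [ih (pvRankOf x) hx9]
      have hmle := minR_le t (pvRankOf x)
      by_cases hlt : pvMinR t (pvRankOf x) < pvRankOf x
      · rw [if_pos hlt, if_pos (by omega)]
        simp
      · have heq : pvMinR t (pvRankOf x) = pvRankOf x := by omega
        rw [if_neg hlt, if_pos (by omega), heq]
        simp only [Option.getD_none]
        exact congrArg some (rank_inv x (by omega)).symm
    · rw [pvSel, if_neg hx, if_neg hx, ih br hbr]

lemma not_mem_of_min {l : List String} {K : Nat}
    (hmin : ∀ y ∈ l, K ≤ pvRankOf y) {s : String} (hs : pvRankOf s < K) :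
    s ∉ l := by
  intro hm
  have := hmin s hm
  omega

-- A's priority scan computes the same minimum-rank element
lemma scan_eq (l : List String) : pvScanPrio clusterPriority l =
    if pvMinR l 9 < 9 then some (clusterPriority.getD (pvMinR l 9) "") else none := by
  have hmin : ∀ y ∈ l, pvMinR l 9 ≤ pvRankOf y := minR_le_mem l 9
  have h9 := minR_le l 9
  by_cases hlt : pvMinR l 9 < 9
  · rw [if_pos hlt]
    obtain ⟨x, hxm, hxr⟩ := minR_attained l 9 hlt
    have hinv : clusterPriority.getD (pvRankOf x) "" = x := rank_inv x (by omega)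
    rw [hxr] at hinv
    have cK : clusterPriority.getD (pvMinR l 9) "" ∈ l := hinv ▸ hxm
    have hno : ∀ s : String, pvRankOf s < pvMinR l 9 → s ∉ l := by
      intro s hs
      exact not_mem_of_min hmin hs
    set M := pvMinR l 9 with hM
    clear_value M
    clear hM hxr hinv hmin h9 hxm
    interval_cases M <;>
      simp_all [pvScanPrio, clusterPriority, rankOf_eq]
  · rw [if_neg hlt]
    have heq : pvMinR l 9 = 9 := by omega
    have hno : ∀ s : String, pvRankOf s < 9 → s ∉ l := by
      intro s hs
      exact not_mem_of_min (K := 9) (by intro y hy; rw [← heq]; exact hmin y hy) hs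
    simp [pvScanPrio, clusterPriority, hno "N5" (by decide), hno "N4" (by decide),
      hno "N3" (by decide), hno "N2" (by decide), hno "N1" (by decide),
      hno "P4" (by decide), hno "P3" (by decide), hno "P2" (by decide),
      hno "P1" (by decide)]

-- B's loop over the verdicts, in terms of the list of "no" ids
lemma loopB_eq (verdicts : List (String × String)) :
    ∀ fn b br, pvLoopB verdicts fn b br =
      (fn.or ((verdicts.filter (fun p => p.2 == "no")).map Prod.fst).head?,
       (pvSel ((verdicts.filter (fun p => p.2 == "no")).map Prod.fst) br).or b,
       pvMinR ((verdicts.filter (fun p => p.2 == "no")).map Prod.fst) br) := by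
  induction verdicts with
  | nil => intro fn b br; simp [pvLoopB, pvSel, minR_nil]
  | cons p rest ih =>
    intro fn b br
    obtain ⟨rid, v⟩ := p
    by_cases hv : v = "no"
    · subst hv
      rw [pvLoopB]
      simp only [ne_eq, not_true_eq_false, if_false,
        show pvPriorityRank.getD rid 9 = pvRankOf rid from rfl]
      have hfn : (if fn.isNone then some rid else fn).or
          (((rest.filter (fun p => p.2 == "no")).map Prod.fst).head?) =
          fn.or (some rid) := by
        cases fn <;> simp
      by_cases hr : pvRankOf rid < br
      · rw [if_pos hr, ih]
        have hsel : (pvSel ((rest.filter (fun p => p.2 == "no")).map Prod.fst)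
            (pvRankOf rid)).or (some rid) =
            some ((pvSel ((rest.filter (fun p => p.2 == "no")).map Prod.fst)
              (pvRankOf rid)).getD rid) := by
          cases pvSel ((rest.filter (fun p => p.2 == "no")).map Prod.fst) (pvRankOf rid) <;> simp
        simp only [List.filter_cons, beq_self_eq_true, if_true, List.map_cons,
          List.head?_cons, pvSel, minR_cons]
        rw [if_pos (show pvRankOf rid < br from hr), if_pos (show pvRankOf rid < br from hr)]
        rw [hsel]
        cases fn <;> simp [pvRankOf]
      · rw [if_neg hr, ih]
        simp only [List.filter_cons, beq_self_eq_true, if_true, List.map_cons,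
          List.head?_cons, pvSel, minR_cons]
        rw [if_neg (show ¬ pvRankOf rid < br from hr), if_neg (show ¬ pvRankOf rid < br from hr)]
        cases fn <;> simp
    · rw [pvLoopB]
      simp only [ne_eq, hv, not_false_eq_true, if_true]
      rw [ih]
      simp [hv]

-- ===== VERDICT (by name: the statement is the Claim_ definition above) =====
theorem predict_cluster_phase_b_py_spec : Claim_equal_predict_cluster_phase_b_py := by
  intro verdicts _
  unfold Spec_predict_cluster_phase_b_py
  unfold predict_cluster_phase_b_py predict_cluster_phase_b_py_alt
  rw [loopB_eq]
  set l := (verdicts.filter (fun p => p.2 == "no")).map Prod.fst with hl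
  clear_value l
  dsimp only
  rw [scan_eq, sel_eq l 9 (by omega)]
  cases l with
  | nil => simp [minR_nil]
  | cons x t =>
    simp only [List.isEmpty_cons, List.head?_cons, Option.or_none]
    by_cases h : pvMinR (x :: t) 9 < 9 <;> simp [h]
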